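-- pv_equiv track=rewrite | github.com/dhiparis/ConstanceDeSalm | CdS_Mastodon/flash_cards/convert_svg.py | create_flashcard_text
-- ===== SOURCE A (Python) =====
-- CHAR_LENGTH = [
--     [".", ",", ":", ";", "‚", "‘", "’", "'", "*", "!", "[", "]", "(", ")", "/", "\\", "{", "}", "f", "i", "ì", "í", "î",
--      "I", "Ì", "Í", "Î", "j", "l", "ꝛ", "ſ", "t", "<"],
--     ["–", "…", "„", "“", "”", "\"", "%", "$", "§", "?", "a", "à", "á", "â", "ä", "b", "c", "ç", "d", "e", "è", "é", "ê",
--      "g", "h", "k", "n", "o", "ò", "ó", "ô", "ö", "p", "q", "r", "s", "ß", "u", "ù", "ú", "û", "ü", "ů", "v", "x", "y",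
--      "z", "J", "1", "2", "3", "4", "5", "6", "7", "8", "9", "0"],
--     ["—", "m", "w", "A", "À", "Á", "Â", "Ä", "B", "C", "Ç", "D", "E", "È", "É", "Ê", "F", "G", "H", "K", "L", "M", "N",
--      "O", "Ò", "Ó", "Ô", "Ö", "P", "Q", "R", "S", "T", "U", "Ù", "Ú", "Û", "Ü", "V", "W", "X", "Y", "Z"]
-- ]
--
-- def create_flashcard_text(text: str) -> str:
--     """
--     Creates a text with linebreaks based on CHAR_LENGTH for the Flashcards
--
--     :param text: The text which should be printed on the flashcards.
--     :return: The text in svg_format.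
--     """
--
--     def calc_length(string: str) -> int:
--         if len(string) < 1:
--             return 0
--         else:
--             if string[0] in CHAR_LENGTH[0]:
--                 return calc_length(string[1:]) + 1
--             elif string[0] in CHAR_LENGTH[1]:
--                 return calc_length(string[1:]) + 2
--             elif string[0] in CHAR_LENGTH[2]:
--                 return calc_length(string[1:]) + 4
--             else:
--                 return calc_length(string[1:]) + 1
--
--     words = text.split(' ')
--     line = ['']
--     for i in words:
--         tmp = line[-1] + ' ' + i
--         if calc_length(tmp) < 62:
--             line[-1] = tmp
--         else:
--             line.append(i)
--     svg_content = ''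
--     for ln in range(len(line)):
--         svg_content += '\t\t\t<tspan class="TextPosition" x="3150"{1}>{0}</tspan>\n'.format(line[ln],
--                                                                                             ' dy="1.2em"' if ln != 0
--                                                                                             else '')
--     return svg_content
-- ===== SOURCE B (Python) =====
-- CHAR_LENGTH = [
--     [".", ",", ":", ";", "‚", "‘", "’", "'", "*", "!", "[", "]", "(", ")", "/", "\\", "{", "}", "f", "i", "ì", "í", "î",
--      "I", "Ì", "Í", "Î", "j", "l", "ꝛ", "ſ", "t", "<"],
--     ["–", "…", "„", "“", "”", "\"", "%", "$", "§", "?", "a", "à", "á", "â", "ä", "b", "c", "ç", "d", "e", "è", "é", "ê",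
--      "g", "h", "k", "n", "o", "ò", "ó", "ô", "ö", "p", "q", "r", "s", "ß", "u", "ù", "ú", "û", "ü", "ů", "v", "x", "y",
--      "z", "J", "1", "2", "3", "4", "5", "6", "7", "8", "9", "0"],
--     ["—", "m", "w", "A", "À", "Á", "Â", "Ä", "B", "C", "Ç", "D", "E", "È", "É", "Ê", "F", "G", "H", "K", "L", "M", "N",
--      "O", "Ò", "Ó", "Ô", "Ö", "P", "Q", "R", "S", "T", "U", "Ù", "Ú", "Û", "Ü", "V", "W", "X", "Y", "Z"]
-- ]
--
-- WEIGHTS = {}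
-- for _w, _group in zip((1, 2, 4), CHAR_LENGTH):
--     for _c in _group:
--         WEIGHTS[_c] = _w
--
--
-- def create_flashcard_text(text: str) -> str:
--     def calc_length(string: str) -> int:
--         total = 0
--         for ch in string:
--             total += WEIGHTS.get(ch, 1)
--         return total
--
--     finished = []
--     current = ''
--     for word in text.split(' '):
--         candidate = current + ' ' + word
--         if calc_length(candidate) < 62:
--             current = candidate
--         else:
--             finished.append(current)
--             current = word
--     finished.append(current)
--
--     parts = ['\t\t\t<tspan class="TextPosition" x="3150">{}</tspan>\n'.format(finished[0])]
--     for extra in finished[1:]: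
--         parts.append('\t\t\t<tspan class="TextPosition" x="3150" dy="1.2em">{}</tspan>\n'.format(extra))
--     return ''.join(parts)
-- ===== Notes on version B (the rewrite author's own statement) =====
-- stated objective: simpler
-- what changed: calc_length becomes an iterative left-to-right accumulation over a flat char-to-weight dict (default 1) instead of A's recursion over string[1:] with three list-membership chains, the packing loop keeps (finished lines, current line) instead of rewriting the last element of one list, and the SVG is emitted as a first-line tspan plus a mapped rest joined together instead of an index loop with a conditional dy.
import Mathlib
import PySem

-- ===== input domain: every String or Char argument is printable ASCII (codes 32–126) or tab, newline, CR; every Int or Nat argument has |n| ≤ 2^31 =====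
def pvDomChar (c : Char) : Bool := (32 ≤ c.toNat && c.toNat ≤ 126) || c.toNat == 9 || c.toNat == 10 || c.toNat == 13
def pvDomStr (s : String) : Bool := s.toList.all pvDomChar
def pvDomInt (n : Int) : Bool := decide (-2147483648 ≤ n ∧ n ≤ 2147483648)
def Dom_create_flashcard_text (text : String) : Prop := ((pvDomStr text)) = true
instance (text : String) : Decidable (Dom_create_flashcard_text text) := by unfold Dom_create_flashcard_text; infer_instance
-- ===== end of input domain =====

set_option maxRecDepth 100000


-- B replaces A's recursive three-list width lookup by a flat weight dict with an
-- iterative accumulating loop, and keeps finished lines and the current line as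
-- separate loop state instead of rewriting the last element of one list (objective: simpler).

-- ===== PORT A =====
def pvCL0 : List Char := ['.', ',', ':', ';', '‚', '‘', '’', '\'', '*', '!', '[', ']', '(', ')', '/', '\\', '{', '}', 'f', 'i', 'ì', 'í', 'î', 'I', 'Ì', 'Í', 'Î', 'j', 'l', 'ꝛ', 'ſ', 't', '<']
def pvCL1 : List Char := ['–', '…', '„', '“', '”', '"', '%', '$', '§', '?', 'a', 'à', 'á', 'â', 'ä', 'b', 'c', 'ç', 'd', 'e', 'è', 'é', 'ê', 'g', 'h', 'k', 'n', 'o', 'ò', 'ó', 'ô', 'ö', 'p', 'q', 'r', 's', 'ß', 'u', 'ù', 'ú', 'û', 'ü', 'ů', 'v', 'x', 'y', 'z', 'J', '1', '2', '3', '4', '5', '6', '7', '8', '9', '0']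
def pvCL2 : List Char := ['—', 'm', 'w', 'A', 'À', 'Á', 'Â', 'Ä', 'B', 'C', 'Ç', 'D', 'E', 'È', 'É', 'Ê', 'F', 'G', 'H', 'K', 'L', 'M', 'N', 'O', 'Ò', 'Ó', 'Ô', 'Ö', 'P', 'Q', 'R', 'S', 'T', 'U', 'Ù', 'Ú', 'Û', 'Ü', 'V', 'W', 'X', 'Y', 'Z']

-- A's inner recursive calc_length
def pvCalcLengthA : List Char → Int
  | [] => 0
  | c :: rest =>
    if c ∈ pvCL0 then pvCalcLengthA rest + 1
    else if c ∈ pvCL1 then pvCalcLengthA rest + 2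
    else if c ∈ pvCL2 then pvCalcLengthA rest + 4
    else pvCalcLengthA rest + 1

-- the formatted tspan of A's output loop, {1} filled iff ln != 0
def pvTspanA (content : List Char) (ln : Nat) : List Char :=
  "\t\t\t<tspan class=\"TextPosition\" x=\"3150\"".toList
    ++ (if ln ≠ 0 then " dy=\"1.2em\"".toList else [])
    ++ ">".toList ++ content ++ "</tspan>\n".toList

def create_flashcard_text (text : String) : String :=
  let words := PySem.Chars.splitOn text.toList [' ']
  -- line[-1]: line is never empty, so pyGetD with a dummy default is exact here
  let line := words.foldl (fun line w =>
      let tmp := PySem.List.pyGetD line (-1) [] ++ [' '] ++ w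
      if pvCalcLengthA tmp < 62 then line.dropLast ++ [tmp] else line ++ [w]) [[]]
  let svg := (List.range line.length).foldl
      (fun acc ln => acc ++ pvTspanA (line.getD ln []) ln) []
  String.ofList svg

-- ===== PORT B =====
-- WEIGHTS: flat dict, built by inserting each group with its weight
def pvWeights : PySem.Dict Char Int :=
  (List.zip [(1 : Int), 2, 4] [pvCL0, pvCL1, pvCL2]).foldl
    (fun d wg => wg.2.foldl (fun d c => d.insert c wg.1) d) PySem.Dict.empty

-- B's iterative calc_length: accumulate WEIGHTS.get(ch, 1) left to right
def pvCalcLengthB (s : List Char) : Int :=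
  s.foldl (fun total ch => total + pvWeights.getD ch 1) 0

def pvTspanFirst (content : List Char) : List Char :=
  "\t\t\t<tspan class=\"TextPosition\" x=\"3150\">".toList ++ content ++ "</tspan>\n".toList

def pvTspanRest (content : List Char) : List Char :=
  "\t\t\t<tspan class=\"TextPosition\" x=\"3150\" dy=\"1.2em\">".toList ++ content ++ "</tspan>\n".toList

def create_flashcard_text_alt (text : String) : String :=
  let st := (PySem.Chars.splitOn text.toList [' ']).foldl
      (fun (st : List (List Char) × List Char) w =>
        let cand := st.2 ++ [' '] ++ w
        if pvCalcLengthB cand < 62 then (st.1, cand) else (st.1 ++ [st.2], w))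
      ([], [])
  let lines := st.1 ++ [st.2]
  let parts := pvTspanFirst (lines.headD []) :: lines.tail.map pvTspanRest
  String.ofList parts.flatten

-- ===== PRECONDITION & SPEC =====
def Spec_create_flashcard_text (text : String) (out : String) : Prop := out = create_flashcard_text_alt text
instance (text : String) (out : String) : Decidable (Spec_create_flashcard_text text out) := by unfold Spec_create_flashcard_text; infer_instance

-- ===== CLAIM (what is proved, stated in full; the proofs are below) =====
def Claim_equal_create_flashcard_text : Prop := ∀ (text : String), Dom_create_flashcard_text text → Spec_create_flashcard_text text (create_flashcard_text text)

-- ===== LEMMAS AND PROOFS =====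

-- the per-character weight A's branch chain assigns
def pvWeightStep (c : Char) : Int :=
  if c ∈ pvCL0 then 1 else if c ∈ pvCL1 then 2 else if c ∈ pvCL2 then 4 else 1

lemma pvWeights_items :
    pvWeights = PySem.Dict.mk (pvCL0.map (·, 1) ++ pvCL1.map (·, 2) ++ pvCL2.map (·, 4)) := by
  decide

lemma pv_get?_mk_map_const (L : List Char) (w : Int) (c : Char) :
    (PySem.Dict.mk (L.map (·, w))).get? c = if c ∈ L then some w else none := by
  induction L with
  | nil => simp [PySem.Dict.get?]
  | cons x xs ih =>
    simp only [List.map_cons, PySem.Dict.get?_mk_cons, ih, List.mem_cons]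
    by_cases h : x = c
    · subst h; simp
    · have h' : ¬c = x := fun hc => h hc.symm
      simp [h, h']

lemma pv_get?_mk_append (xs ys : List (Char × Int)) (c : Char) :
    (PySem.Dict.mk (xs ++ ys)).get? c
      = ((PySem.Dict.mk xs).get? c).or ((PySem.Dict.mk ys).get? c) := by
  induction xs with
  | nil => simp [PySem.Dict.get?]
  | cons p ps ih =>
    obtain ⟨k, v⟩ := p
    simp only [List.cons_append, PySem.Dict.get?_mk_cons, ih]
    split <;> simp

lemma pvWeight_eq (c : Char) : pvWeights.getD c 1 = pvWeightStep c := by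
  rw [pvWeights_items]
  simp only [PySem.Dict.getD, List.append_assoc, pv_get?_mk_append, pv_get?_mk_map_const,
    pvWeightStep]
  by_cases h0 : c ∈ pvCL0 <;> by_cases h1 : c ∈ pvCL1 <;> by_cases h2 : c ∈ pvCL2 <;>
    simp [h0, h1, h2]

lemma pvCalcLengthA_cons (c : Char) (rest : List Char) :
    pvCalcLengthA (c :: rest) = pvCalcLengthA rest + pvWeightStep c := by
  simp only [pvCalcLengthA, pvWeightStep]
  split_ifs <;> rfl

lemma pvCalcLengthB_fold (s : List Char) :
    ∀ a : Int, s.foldl (fun total ch => total + pvWeights.getD ch 1) a = a + pvCalcLengthA s := by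
  induction s with
  | nil => intro a; simp [pvCalcLengthA]
  | cons c rest ih =>
    intro a
    simp only [List.foldl_cons]
    rw [ih, pvWeight_eq, pvCalcLengthA_cons]
    ring

lemma pvCalcLength_eq (s : List Char) : pvCalcLengthB s = pvCalcLengthA s := by
  simp [pvCalcLengthB, pvCalcLengthB_fold]

lemma pv_loop_inv (ws : List (List Char)) :
    ∀ (fin : List (List Char)) (cur : List Char),
      ws.foldl (fun line w =>
          let tmp := PySem.List.pyGetD line (-1) [] ++ [' '] ++ w
          if pvCalcLengthA tmp < 62 then line.dropLast ++ [tmp] else line ++ [w]) (fin ++ [cur])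
        = (ws.foldl (fun (st : List (List Char) × List Char) w =>
            let cand := st.2 ++ [' '] ++ w
            if pvCalcLengthB cand < 62 then (st.1, cand) else (st.1 ++ [st.2], w)) (fin, cur)).1
          ++ [(ws.foldl (fun (st : List (List Char) × List Char) w =>
            let cand := st.2 ++ [' '] ++ w
            if pvCalcLengthB cand < 62 then (st.1, cand) else (st.1 ++ [st.2], w)) (fin, cur)).2] := by
  induction ws with
  | nil => intro fin cur; simp
  | cons w rest ih =>
    intro fin cur
    simp only [List.foldl_cons, PySem.List.pyGetD_neg_one_append_singleton]
    rw [pvCalcLength_eq]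
    by_cases h : pvCalcLengthA (cur ++ [' '] ++ w) < 62
    · simp only [h, if_pos, List.dropLast_concat]
      simpa using ih fin (cur ++ [' '] ++ w)
    · simp only [h, if_neg, not_false_iff]
      simpa using ih (fin ++ [cur]) w
  
lemma pvTspanA_zero (s : List Char) : pvTspanA s 0 = pvTspanFirst s := by
  simp only [pvTspanA, pvTspanFirst, ne_eq, not_true_eq_false, if_false, List.append_nil]
  rw [show ("\t\t\t<tspan class=\"TextPosition\" x=\"3150\"".toList ++ ">".toList)
      = "\t\t\t<tspan class=\"TextPosition\" x=\"3150\">".toList from by decide]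

lemma pvTspanA_succ (s : List Char) (n : Nat) : pvTspanA s (n + 1) = pvTspanRest s := by
  simp only [pvTspanA, pvTspanRest, ne_eq, Nat.succ_ne_zero, not_false_iff, if_true]
  rw [show ("\t\t\t<tspan class=\"TextPosition\" x=\"3150\"".toList ++ " dy=\"1.2em\"".toList
        ++ ">".toList)
      = "\t\t\t<tspan class=\"TextPosition\" x=\"3150\" dy=\"1.2em\">".toList from by decide]

lemma pv_flatMap_range_getD (xs : List (List Char)) :
    (List.range xs.length).flatMap (fun i => pvTspanRest (xs.getD i [])) = (xs.map pvTspanRest).flatten := by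
  induction xs with
  | nil => simp
  | cons x rest ih =>
    simp only [List.length_cons, List.range_succ_eq_map, List.flatMap_cons, List.flatMap_map]
    simp only [List.getD_cons_succ, List.getD_cons_zero, ih, List.map_cons,
      List.flatten_cons]

lemma pv_emit_eq (x : List Char) (xs : List (List Char)) :
    (List.range (x :: xs).length).foldl
        (fun acc ln => acc ++ pvTspanA ((x :: xs).getD ln []) ln) []
      = pvTspanFirst x ++ (xs.map pvTspanRest).flatten := by
  rw [PySem.List.foldl_append_eq_flatMap]
  simp only [List.length_cons, List.range_succ_eq_map, List.flatMap_cons, List.flatMap_map,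
    List.nil_append, List.getD_cons_zero, pvTspanA_zero]
  congr 1
  calc (List.range xs.length).flatMap
        ((fun ln => pvTspanA ((x :: xs).getD ln []) ln) ∘ Nat.succ)
      = (List.range xs.length).flatMap (fun i => pvTspanRest (xs.getD i [])) := by
        apply List.flatMap_congr
        intro i _
        simp [Function.comp, pvTspanA_succ]
    _ = (xs.map pvTspanRest).flatten := pv_flatMap_range_getD xs

-- ===== VERDICT (by name: the statement is the Claim_ definition above) =====
theorem create_flashcard_text_spec : Claim_equal_create_flashcard_text := by
  intro text _
  unfold Spec_create_flashcard_text create_flashcard_text create_flashcard_text_alt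
  simp only []
  have hline := pv_loop_inv (PySem.Chars.splitOn text.toList [' ']) [] []
  simp only [List.nil_append] at hline
  rw [hline]
  set st := (PySem.Chars.splitOn text.toList [' ']).foldl
      (fun (st : List (List Char) × List Char) w =>
        let cand := st.2 ++ [' '] ++ w
        if pvCalcLengthB cand < 62 then (st.1, cand) else (st.1 ++ [st.2], w)) ([], []) with hst
  cases hsplit : st.1 ++ [st.2] with
  | nil => exact absurd hsplit (by simp)
  | cons x xs =>
    rw [pv_emit_eq x xs]
    simp
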